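-- pv_equiv track=rewrite | github.com/alleyex/crypto | app/core/db.py | _rewrite_query_params
-- ===== SOURCE A (Python) =====
-- def _rewrite_query_params(query: str) -> str:
--     rewritten: list[str] = []
--     in_single = False
--     in_double = False
--
--     for char in query:
--         if char == "'" and not in_double:
--             in_single = not in_single
--             rewritten.append(char)
--             continue
--         if char == '"' and not in_single:
--             in_double = not in_double
--             rewritten.append(char)
--             continue
--         if char == "?" and not in_single and not in_double:
--             rewritten.append("%s")
--             continue
--         rewritten.append(char)
--
--     return "".join(rewritten)
-- ===== SOURCE B (Python) =====
-- def _rewrite_query_params(query: str) -> str: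
--     # Chunk-based rewrite: on a quote, an inner loop consumes the whole quoted
--     # span from the shared iterator at once, so no in_single/in_double quoting
--     # state is carried between iterations of the outer loop.
--     out = []
--     it = iter(query)
--     for c in it:
--         if c in "'\"":
--             span = [c]
--             for d in it:
--                 span.append(d)
--                 if d == c:
--                     break
--             out.append("".join(span))
--         elif c == "?":
--             out.append("%s")
--         else:
--             out.append(c)
--     return "".join(out)
-- ===== Notes on version B (the rewrite author's own statement) =====
-- stated objective: alternative
-- what changed: B replaces A's per-character scan with two boolean in-quote flags by a chunk-based rewrite: on a quote an inner loop consumes the whole quoted span at once (unterminated quotes swallow the remainder), so no quoting state is carried between outer-loop iterations.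
import Mathlib
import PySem

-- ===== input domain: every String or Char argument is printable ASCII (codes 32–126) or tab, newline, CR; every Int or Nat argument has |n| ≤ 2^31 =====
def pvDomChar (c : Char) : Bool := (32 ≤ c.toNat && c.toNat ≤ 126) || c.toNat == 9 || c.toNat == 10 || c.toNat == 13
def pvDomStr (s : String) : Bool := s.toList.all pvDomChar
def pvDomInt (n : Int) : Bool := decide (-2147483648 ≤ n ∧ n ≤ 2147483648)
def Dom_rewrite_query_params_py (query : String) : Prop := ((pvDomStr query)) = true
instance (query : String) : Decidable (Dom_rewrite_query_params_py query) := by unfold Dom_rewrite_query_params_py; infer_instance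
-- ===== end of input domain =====

-- B rewrites '?' to '%s' by consuming each whole quoted span at once with an inner loop instead
-- of A's per-character scan with in_single/in_double flags; return values agree on all inputs.

-- ===== PORT A =====
-- one step of A's for-loop: state = (rewritten, in_single, in_double)
def pvStepA (st : List String × Bool × Bool) (c : Char) : List String × Bool × Bool :=
  match st with
  | (rw, ins, ind) =>
    if c == '\'' && !ind then (rw ++ [String.ofList [c]], !ins, ind)
    else if c == '"' && !ins then (rw ++ [String.ofList [c]], ins, !ind)
    else if c == '?' && !ins && !ind then (rw ++ ["%s"], ins, ind)
    else (rw ++ [String.ofList [c]], ins, ind)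

def rewrite_query_params_py (query : String) : String :=
  let r := query.toList.foldl pvStepA ([], false, false)
  PySem.Str.join "" r.1

-- ===== PORT B =====
-- port of B's inner for-loop: collects the span up to and including the closing quote,
-- returning (span, remaining characters); an unterminated quote takes everything
def pvSpanQuote (q : Char) (cs : List Char) : List Char × List Char :=
  match cs with
  | [] => ([], [])
  | c :: rest => if c == q then ([c], rest) else
      let p := pvSpanQuote q rest
      (c :: p.1, p.2)

theorem pvSpanQuote_snd_length_le (q : Char) (cs : List Char) :
    (pvSpanQuote q cs).2.length ≤ cs.length := by
  induction cs with
  | nil => simp [pvSpanQuote]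
  | cons c rest ih =>
    by_cases h : c == q <;> simp [pvSpanQuote, h] <;> omega

-- B's while loop over the remaining characters
def pvAltGo : List Char → List Char
  | [] => []
  | c :: rest =>
    if c == '\'' || c == '"' then
      (c :: (pvSpanQuote c rest).1) ++ pvAltGo (pvSpanQuote c rest).2
    else if c == '?' then '%' :: 's' :: pvAltGo rest
    else c :: pvAltGo rest
termination_by cs => cs.length
decreasing_by
  · have := pvSpanQuote_snd_length_le c rest; simp; omega
  · simp
  · simp

def rewrite_query_params_py_alt (query : String) : String :=
  String.ofList (pvAltGo query.toList)

-- ===== PRECONDITION & SPEC =====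
def Spec_rewrite_query_params_py (query : String) (out : String) : Prop := out = rewrite_query_params_py_alt query
instance (query : String) (out : String) : Decidable (Spec_rewrite_query_params_py query out) := by unfold Spec_rewrite_query_params_py; infer_instance

-- ===== CLAIM (what is proved, stated in full; the proofs are below) =====
def Claim_equal_rewrite_query_params_py : Prop := ∀ (query : String), Dom_rewrite_query_params_py query → Spec_rewrite_query_params_py query (rewrite_query_params_py query)

-- ===== LEMMAS AND PROOFS =====

-- while in a single-quoted span, A appends each char until the closing quote
theorem pvFold_single (cs : List Char) : ∀ rw : List String,
    (cs.foldl pvStepA (rw, true, false)).1 =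
      ((pvSpanQuote '\'' cs).2.foldl pvStepA
        (rw ++ (pvSpanQuote '\'' cs).1.map (fun c => String.ofList [c]), false, false)).1 := by
  induction cs with
  | nil => intro rw; simp [pvSpanQuote]
  | cons c rest ih =>
    intro rw
    by_cases h : c == '\''
    · have hc : c = '\'' := by simpa using h
      simp [pvSpanQuote, hc, pvStepA]
    · have h2 : ¬(c == '"' && true) = true ∨ True := Or.inr trivial
      simp only [pvSpanQuote, h, if_false, List.foldl_cons, pvStepA]
      simp only [h, Bool.false_and, Bool.and_false, Bool.and_true, Bool.not_true,
        Bool.false_eq_true, if_false]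
      rw [ih]
      simp

-- symmetric lemma for a double-quoted span
theorem pvFold_double (cs : List Char) : ∀ rw : List String,
    (cs.foldl pvStepA (rw, false, true)).1 =
      ((pvSpanQuote '"' cs).2.foldl pvStepA
        (rw ++ (pvSpanQuote '"' cs).1.map (fun c => String.ofList [c]), false, false)).1 := by
  induction cs with
  | nil => intro rw; simp [pvSpanQuote]
  | cons c rest ih =>
    intro rw
    by_cases h : c == '"'
    · have hc : c = '"' := by simpa using h
      simp [pvSpanQuote, hc, pvStepA]
    · simp only [pvSpanQuote, h, if_false, List.foldl_cons, pvStepA]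
      simp only [h, Bool.false_and, Bool.and_false, Bool.and_true, Bool.not_true,
        Bool.false_eq_true, if_false]
      rw [ih]
      simp

theorem pvFlatMap_singletons (l : List Char) :
    (l.map (fun c => String.ofList [c])).flatMap String.toList = l := by
  induction l with
  | nil => simp
  | cons c rest ih => simp [ih, String.toList_ofList]

-- main invariant: A's joined output equals B's chunk output
theorem pvMain : ∀ n : Nat, ∀ cs : List Char, cs.length ≤ n → ∀ rw : List String,
    ((cs.foldl pvStepA (rw, false, false)).1).flatMap String.toList =
      rw.flatMap String.toList ++ pvAltGo cs := by
  intro n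
  induction n with
  | zero =>
    intro cs hcs rw
    have : cs = [] := List.length_eq_zero_iff.mp (Nat.le_zero.mp hcs)
    subst this; simp [pvAltGo]
  | succ n ih =>
    intro cs hcs rw
    match cs with
    | [] => simp [pvAltGo]
    | c :: rest =>
      by_cases h1 : c = '\''
      · subst h1
        simp only [List.foldl_cons]
        rw [show pvStepA (rw, false, false) '\'' = (rw ++ [String.ofList ['\'']], true, false) by
          simp [pvStepA]]
        rw [pvFold_single]
        have hlen : (pvSpanQuote '\'' rest).2.length ≤ n := by
          have := pvSpanQuote_snd_length_le '\'' rest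
          simp at hcs; omega
        rw [ih _ hlen]
        simp [pvAltGo, pvFlatMap_singletons, List.flatMap_append, String.toList_ofList]
      · by_cases h2 : c = '"'
        · subst h2
          simp only [List.foldl_cons]
          rw [show pvStepA (rw, false, false) '"' = (rw ++ [String.ofList ['"']], false, true) by
            simp [pvStepA]]
          rw [pvFold_double]
          have hlen : (pvSpanQuote '"' rest).2.length ≤ n := by
            have := pvSpanQuote_snd_length_le '"' rest
            simp at hcs; omega
          rw [ih _ hlen]
          simp [pvAltGo, pvFlatMap_singletons, List.flatMap_append, String.toList_ofList]
        · by_cases h3 : c = '?'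
          · subst h3
            simp only [List.foldl_cons]
            rw [show pvStepA (rw, false, false) '?' = (rw ++ ["%s"], false, false) by
              simp [pvStepA]]
            rw [ih rest (by simp at hcs; omega)]
            simp [pvAltGo, show ("%s" : String).toList = ['%', 's'] from rfl]
          · have hb1 : (c == '\'') = false := by simpa using h1
            have hb2 : (c == '"') = false := by simpa using h2
            have hb3 : (c == '?') = false := by simpa using h3
            simp only [List.foldl_cons]
            rw [show pvStepA (rw, false, false) c = (rw ++ [String.ofList [c]], false, false) by
              simp [pvStepA, hb1, hb2, hb3]]
            rw [ih rest (by simp at hcs; omega)]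
            simp [pvAltGo, hb1, hb2, hb3, String.toList_ofList]

theorem pvJoinNilFlatten (ls : List (List Char)) : PySem.Chars.join [] ls = ls.flatten := by
  simp only [PySem.Chars.join, List.intercalate]
  induction ls with
  | nil => simp
  | cons a t ih =>
    cases t with
    | nil => simp
    | cons b t' =>
      rw [show List.intersperse ([] : List Char) (a :: b :: t') =
            a :: [] :: List.intersperse [] (b :: t') from rfl]
      simp_all

theorem pvStrJoinFlat (l : List String) :
    (PySem.Str.join "" l).toList = l.flatMap String.toList := by
  simp [PySem.Str.join, pvJoinNilFlatten, List.flatMap]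

-- ===== VERDICT (by name: the statement is the Claim_ definition above) =====
theorem rewrite_query_params_py_spec : Claim_equal_rewrite_query_params_py := by
  intro query _
  unfold Spec_rewrite_query_params_py rewrite_query_params_py rewrite_query_params_py_alt
  have h := pvMain query.toList.length query.toList (le_refl _) []
  simp only [List.flatMap_nil, List.nil_append] at h
  have hj : (PySem.Str.join ""
      ((query.toList.foldl pvStepA ([], false, false)).1)).toList = pvAltGo query.toList := by
    rw [pvStrJoinFlat]; exact h
  have h2 := congrArg String.ofList hj
  rwa [String.ofList_toList] at h2
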